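-- pv_equiv track=rewrite | github.com/I-matics/I-matics_backend | api/Scoring/helper_functions.py | overspeed_intervals
-- ===== SOURCE A (Python) =====
-- def overspeed_intervals(speed_data, overspeed_limit=100, interval_duration=50):
--     overspeed_intervals = []
--     current_interval = []
--     current_time = 0
--     for speed in speed_data:
--         if speed > overspeed_limit:
--             current_interval.append(current_time)
--         current_time += 1
--
--         if current_time % interval_duration == 0:
--             if current_interval:
--                 overspeed_intervals.append(current_interval)
--             current_interval = []
--
--     return overspeed_intervals
-- ===== SOURCE B (Python) =====
-- def overspeed_intervals(speed_data, overspeed_limit=100, interval_duration=50):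
--     if not speed_data:
--         return []
--     result = []
--     for base in range(0, len(speed_data) - interval_duration + 1, interval_duration):
--         chunk = speed_data[base:base + interval_duration]
--         group = [base + i for i, s in enumerate(chunk) if s > overspeed_limit]
--         if group:
--             result.append(group)
--     return result
-- ===== Notes on version B (the rewrite author's own statement) =====
-- stated objective: alternative
-- what changed: Replaces A's single interleaved loop (running timer, modulo flush, mutable current-interval buffer) with a chunked decomposition: iterate over the starts of the complete fixed-size windows and build each window's overspeed-timestamp group from a slice; Pre_ restricts to positive interval_duration (or an empty list): duration 0 raises in both, and a negative duration is outside the task's natural domain.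
-- outside the precondition, e.g. on overspeed_intervals([150], 100, 0): A raises ZeroDivisionError, B raises ValueError; on overspeed_intervals([150, 150], 100, -1): A returns [[0], [1]], B returns []
import Mathlib
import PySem

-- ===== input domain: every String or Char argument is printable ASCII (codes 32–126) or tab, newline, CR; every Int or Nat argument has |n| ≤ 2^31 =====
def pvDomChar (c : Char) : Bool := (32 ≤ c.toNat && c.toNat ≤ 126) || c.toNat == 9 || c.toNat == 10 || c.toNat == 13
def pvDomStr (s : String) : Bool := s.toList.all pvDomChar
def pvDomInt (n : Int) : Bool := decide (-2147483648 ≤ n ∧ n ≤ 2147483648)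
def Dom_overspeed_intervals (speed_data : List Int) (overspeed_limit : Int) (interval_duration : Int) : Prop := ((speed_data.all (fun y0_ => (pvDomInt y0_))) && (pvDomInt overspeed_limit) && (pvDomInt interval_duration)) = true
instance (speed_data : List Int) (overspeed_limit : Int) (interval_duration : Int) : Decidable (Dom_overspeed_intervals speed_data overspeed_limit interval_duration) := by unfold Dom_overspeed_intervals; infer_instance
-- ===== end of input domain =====

-- B replaces A's single interleaved timer/modulo loop with a chunked decomposition (iterate over
-- complete-window start offsets, build each window's group from a slice); equal return value on Pre_.

-- ===== PORT A =====
def overspeed_intervals (speed_data : List Int) (overspeed_limit : Int) (interval_duration : Int) : List (List Int) :=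
  (speed_data.foldl
    (fun (st : List (List Int) × List Int × Int) speed =>
      let cur := if speed > overspeed_limit then st.2.1 ++ [st.2.2] else st.2.1
      let t := st.2.2 + 1
      if PySem.Int.mod t interval_duration = 0 then
        (if cur = [] then st.1 else st.1 ++ [cur], ([] : List Int), t)
      else (st.1, cur, t))
    ([], [], 0)).1

-- ===== PORT B =====
def overspeed_intervals_alt (speed_data : List Int) (overspeed_limit : Int) (interval_duration : Int) : List (List Int) :=
  if speed_data = [] then [] else
  (PySem.List.pyRange 0 ((speed_data.length : Int) - interval_duration + 1) interval_duration).foldl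
    (fun result base =>
      let chunk := PySem.List.slice speed_data (some base) (some (base + interval_duration))
      let group := (PySem.List.enumerate chunk).filterMap
        (fun p => if p.2 > overspeed_limit then some (base + p.1) else none)
      if group = [] then result else result ++ [group])
    []

-- ===== PRECONDITION & SPEC =====
-- Pre_ excludes interval_duration ≤ 0 on a non-empty list: interval_duration = 0 makes A raise
-- ZeroDivisionError (B raises ValueError), and a negative duration lies outside the natural domain
-- of the task (a window length must be positive); there A groups by |interval_duration| while B
-- reports no complete windows.
def Pre_overspeed_intervals (speed_data : List Int) (overspeed_limit : Int) (interval_duration : Int) : Prop :=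
  speed_data = [] ∨ 1 ≤ interval_duration
instance (speed_data : List Int) (overspeed_limit : Int) (interval_duration : Int) : Decidable (Pre_overspeed_intervals speed_data overspeed_limit interval_duration) := by unfold Pre_overspeed_intervals; infer_instance
def pvWitness_overspeed_intervals : List Int × Int × Int := ([150, 50, 120, 101], 100, 2)

def Spec_overspeed_intervals (speed_data : List Int) (overspeed_limit : Int) (interval_duration : Int) (out : List (List Int)) : Prop := out = overspeed_intervals_alt speed_data overspeed_limit interval_duration
instance (speed_data : List Int) (overspeed_limit : Int) (interval_duration : Int) (out : List (List Int)) : Decidable (Spec_overspeed_intervals speed_data overspeed_limit interval_duration out) := by unfold Spec_overspeed_intervals; infer_instance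

-- ===== CLAIM (what is proved, stated in full; the proofs are below) =====
def Claim_equal_overspeed_intervals : Prop := ∀ (speed_data : List Int) (overspeed_limit : Int) (interval_duration : Int), Dom_overspeed_intervals speed_data overspeed_limit interval_duration → Pre_overspeed_intervals speed_data overspeed_limit interval_duration → Spec_overspeed_intervals speed_data overspeed_limit interval_duration (overspeed_intervals speed_data overspeed_limit interval_duration)

-- ===== LEMMAS AND PROOFS =====

-- A's loop body, named (definitionally the lambda inside the port of A)
def pvStep (lim d : Int) (st : List (List Int) × List Int × Int) (speed : Int) : List (List Int) × List Int × Int :=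
  let cur := if speed > lim then st.2.1 ++ [st.2.2] else st.2.1
  let t := st.2.2 + 1
  if PySem.Int.mod t d = 0 then
    (if cur = [] then st.1 else st.1 ++ [cur], ([] : List Int), t)
  else (st.1, cur, t)

-- the overspeed timestamps of a block whose first element carries time t
def pvGrp (lim : Int) : List Int → Int → List Int
  | [], _ => []
  | x :: xs, t => (if x > lim then [t] else []) ++ pvGrp lim xs (t + 1)

def pvEmit (c : List Int) : List (List Int) := if c = [] then [] else [c]

theorem pvPortA_eq (sd : List Int) (lim d : Int) :
    overspeed_intervals sd lim d = (sd.foldl (pvStep lim d) ([], [], 0)).1 := rfl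

theorem pvGrp_append (lim : Int) : ∀ (xs ys : List Int) (t : Int),
    pvGrp lim (xs ++ ys) t = pvGrp lim xs t ++ pvGrp lim ys (t + xs.length)
  | [], ys, t => by simp [pvGrp]
  | x :: xs, ys, t => by
    simp only [List.cons_append, pvGrp, pvGrp_append lim xs ys (t + 1), List.length_cons,
      List.append_assoc]
    rw [show t + 1 + (xs.length : Int) = t + ((xs.length + 1 : Nat) : Int) from by push_cast; ring]

theorem pvStep_partial (lim d : Int) (hd : 1 ≤ d) : ∀ (xs : List Int) (res : List (List Int))
    (cur : List Int) (t0 j : Int), d ∣ t0 → 0 ≤ j → j + xs.length < d →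
    xs.foldl (pvStep lim d) (res, cur, t0 + j) = (res, cur ++ pvGrp lim xs (t0 + j), t0 + j + xs.length)
  | [], res, cur, t0, j, ht, hj, hlt => by simp [pvGrp]
  | x :: xs, res, cur, t0, j, ht, hj, hlt => by
    have hne : ¬ PySem.Int.mod (t0 + j + 1) d = 0 := by
      rw [PySem.Int.mod_eq_zero_iff_dvd]
      intro hdvd
      have h1 : d ∣ j + 1 := by
        have := Int.dvd_sub hdvd ht
        simpa [add_assoc, add_comm, add_left_comm] using this
      have h2 : d ≤ j + 1 := Int.le_of_dvd (by omega) h1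
      simp only [List.length_cons] at hlt
      have : (0:Int) ≤ (xs.length : Int) := by positivity
      push_cast at hlt
      omega
    have hstep : pvStep lim d (res, cur, t0 + j) x =
        (res, (if x > lim then cur ++ [t0 + j] else cur), t0 + j + 1) := by
      show (if PySem.Int.mod (t0 + j + 1) d = 0 then _ else _) = _
      rw [if_neg hne]
    have hlt' : (j + 1) + (xs.length : Int) < d := by
      simp only [List.length_cons] at hlt
      push_cast at hlt
      omega
    have hrec := pvStep_partial lim d hd xs res (if x > lim then cur ++ [t0 + j] else cur)
      t0 (j + 1) ht (by omega) hlt'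
    rw [List.foldl_cons, hstep, show t0 + j + 1 = t0 + (j + 1) from by ring, hrec]
    simp only [pvGrp, Prod.mk.injEq, List.length_cons]
    refine ⟨by trivial, ?_, ?_⟩
    · rw [show t0 + (j + 1) = t0 + j + 1 from by ring]
      split <;> simp
    · push_cast; ring

theorem pvStep_chunk (lim d : Int) (hd : 1 ≤ d) (xs : List Int) (res : List (List Int)) (t0 : Int)
    (ht : d ∣ t0) (hlen : (xs.length : Int) = d) :
    xs.foldl (pvStep lim d) (res, [], t0) = (res ++ pvEmit (pvGrp lim xs t0), [], t0 + d) := by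
  have hne : xs ≠ [] := by intro h; subst h; simp at hlen; omega
  obtain ⟨ys, z, hxz⟩ : ∃ ys z, xs = ys ++ [z] :=
    ⟨xs.dropLast, xs.getLast hne, (List.dropLast_append_getLast hne).symm⟩
  subst hxz
  have hylen : (ys.length : Int) = d - 1 := by
    simp [List.length_append] at hlen; omega
  have hpart := pvStep_partial lim d hd ys res [] t0 0 ht le_rfl (by omega)
  rw [List.foldl_append]
  simp only [add_zero] at hpart
  rw [hpart]
  have hmod : PySem.Int.mod (t0 + ys.length + 1) d = 0 := by
    rw [PySem.Int.mod_eq_zero_iff_dvd, hylen]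
    have : t0 + (d - 1) + 1 = t0 + d := by ring
    rw [this]
    exact Int.dvd_add ht dvd_rfl
  have hgrp : pvGrp lim (ys ++ [z]) t0 =
      pvGrp lim ys t0 ++ (if z > lim then [t0 + ys.length] else []) := by
    rw [pvGrp_append]
    simp [pvGrp]
  have happ : ∀ (g : List Int), (if g = [] then res else res ++ [g]) = res ++ pvEmit g := by
    intro g; unfold pvEmit; split <;> simp
  have htime : t0 + ys.length + 1 = t0 + d := by rw [hylen]; ring
  simp only [List.foldl_cons, List.foldl_nil, pvStep, hmod, if_pos, List.nil_append, htime, hgrp]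
  by_cases hz : z > lim <;>
    simp only [hz, if_true, if_false, ite_true, ite_false, List.append_nil] <;>
    rw [if_pos (htime ▸ hmod)] <;>
    exact congrArg (fun r => (r, ([] : List Int), t0 + d)) (happ _)

theorem pvA_main (lim d : Int) (hd : 1 ≤ d) : ∀ (N : Nat) (xs : List Int) (res : List (List Int))
    (t0 : Int), xs.length = N → d ∣ t0 →
    (xs.foldl (pvStep lim d) (res, [], t0)).1 =
      res ++ (List.range (xs.length / d.toNat)).flatMap
        (fun k => pvEmit (pvGrp lim ((xs.drop (d.toNat * k)).take d.toNat) (t0 + d * k))) := by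
  intro N
  induction N using Nat.strong_induction_on with
  | _ N ih =>
    intro xs res t0 hN ht
    by_cases hsmall : xs.length < d.toNat
    · rw [Nat.div_eq_of_lt hsmall]
      have hlt : (0 : Int) + xs.length < d := by
        have := Int.toNat_of_nonneg (show (0:Int) ≤ d by omega)
        omega
      have := pvStep_partial lim d hd xs res [] t0 0 ht le_rfl hlt
      simp only [add_zero] at this
      simp [this]
    · rw [not_lt] at hsmall
      set D := d.toNat with hD
      have hdD : (D : Int) = d := Int.toNat_of_nonneg (by omega)
      have hsplit : xs = xs.take D ++ xs.drop D := (List.take_append_drop D xs).symm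
      have hlen1 : ((xs.take D).length : Int) = d := by
        simp [List.length_take, Nat.min_eq_left hsmall, hdD]
      conv_lhs => rw [hsplit]
      rw [List.foldl_append, pvStep_chunk lim d hd _ res t0 ht hlen1]
      have hdroplen : (xs.drop D).length = N - D := by simp [List.length_drop, hN]
      have hDpos : 0 < D := by omega
      have hNN : N - D < N := by omega
      have hrec := ih (N - D) hNN (xs.drop D) (res ++ pvEmit (pvGrp lim (xs.take D) t0))
        (t0 + d) hdroplen (Int.dvd_add ht dvd_rfl)
      rw [hrec]
      have hdivs : xs.length / D = (xs.drop D).length / D + 1 := by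
        rw [List.length_drop]
        exact Nat.div_eq_sub_div hDpos hsmall
      rw [hdivs, List.range_succ_eq_map]
      rw [List.flatMap_cons, List.flatMap_map]
      simp only [Nat.mul_zero, List.drop_zero, Nat.cast_zero, mul_zero, add_zero, List.append_assoc]
      congr 1
      congr 1
      refine congrArg (fun g => List.flatMap g _) (funext fun k => ?_)
      have h1 : (xs.drop D).drop (D * k) = xs.drop (D * Nat.succ k) := by
        rw [List.drop_drop]; congr 1; rw [Nat.mul_succ]; omega
      have h2 : t0 + d + d * (k : Int) = t0 + d * ((Nat.succ k : Nat) : Int) := by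
        push_cast; ring
      rw [h1, h2]

theorem pvRange_eq (d : Int) (hd : 1 ≤ d) (len : Nat) :
    PySem.List.pyRange 0 ((len : Int) - d + 1) d =
      (List.range (len / d.toNat)).map (fun k : Nat => d * (k : Int)) := by
  have hcount : (if (0:Int) < (len : Int) - d + 1 then
      (((len : Int) - d + 1 - 0 + d - 1) / d).toNat else 0) = len / d.toNat := by
    by_cases h : (0:Int) < (len : Int) - d + 1
    · rw [if_pos h]
      have h1 : (len : Int) - d + 1 - 0 + d - 1 = (len : Int) := by ring
      rw [h1]
      have hdD : ((d.toNat : Int)) = d := Int.toNat_of_nonneg (by omega)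
      have h2 : (len : Int) / d = ((len / d.toNat : Nat) : Int) := by
        rw [← hdD]
        exact_mod_cast (Int.natCast_div len d.toNat).symm
      rw [h2, Int.toNat_natCast]
    · rw [if_neg h]
      have hlt : len < d.toNat := by omega
      rw [Nat.div_eq_of_lt hlt]
  rw [PySem.List.pyRange_of_pos _ _ (by omega), hcount]
  simp

theorem pvFoldEmit {α : Type} (G : α → List Int) : ∀ (l : List α) (init : List (List Int)),
    l.foldl (fun r x => if G x = [] then r else r ++ [G x]) init =
      init ++ l.flatMap (fun x => pvEmit (G x))
  | [], init => by simp
  | x :: l, init => by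
    rw [List.foldl_cons, pvFoldEmit G l]
    simp only [List.flatMap_cons, pvEmit]
    split <;> simp

theorem pvEnum (lim : Int) : ∀ (xs : List Int) (s t : Int),
    (PySem.List.enumerate xs s).filterMap
        (fun p => if p.2 > lim then some (t + p.1) else none) = pvGrp lim xs (t + s)
  | [], s, t => by simp [PySem.List.enumerate_nil, pvGrp]
  | x :: xs, s, t => by
    rw [PySem.List.enumerate_cons, List.filterMap_cons]
    have hrec := pvEnum lim xs (s + 1) t
    by_cases hx : x > lim
    · simp only [hx, if_pos, pvGrp, hrec]
      have : t + (s + 1) = (t + s) + 1 := by ring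
      rw [this]
      simp
    · simp only [hx, if_neg, pvGrp, hrec, not_false_iff]
      have : t + (s + 1) = (t + s) + 1 := by ring
      rw [this]
      simp [hx]

theorem pvBfold (sd : List Int) (lim d : Int) : ∀ (l : List Int) (init : List (List Int)),
    l.foldl (fun result base =>
      let chunk := PySem.List.slice sd (some base) (some (base + d))
      let group := (PySem.List.enumerate chunk).filterMap
        (fun p => if p.2 > lim then some (base + p.1) else none)
      if group = [] then result else result ++ [group]) init
    = init ++ l.flatMap (fun base =>
        pvEmit ((PySem.List.enumerate (PySem.List.slice sd (some base) (some (base + d)))).filterMap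
          (fun p => if p.2 > lim then some (base + p.1) else none)))
  | [], init => by simp
  | x :: l, init => by
    rw [List.foldl_cons, pvBfold sd lim d l]
    simp only [List.flatMap_cons, pvEmit]
    split <;> simp_all

theorem pvB_main (sd : List Int) (lim d : Int) (hd : 1 ≤ d) (hne : sd ≠ []) :
    overspeed_intervals_alt sd lim d =
      (List.range (sd.length / d.toNat)).flatMap
        (fun k => pvEmit (pvGrp lim ((sd.drop (d.toNat * k)).take d.toNat) (d * k))) := by
  unfold overspeed_intervals_alt
  rw [if_neg hne, pvBfold sd lim d, pvRange_eq d hd sd.length, List.flatMap_map, List.nil_append]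
  refine congrArg (fun g => List.flatMap g _) (funext fun k => ?_)
  have hdD : ((d.toNat : Int)) = d := Int.toNat_of_nonneg (by omega)
  have hslice : PySem.List.slice sd (some (d * (k : Int))) (some (d * (k : Int) + d)) =
      (sd.drop (d.toNat * k)).take d.toNat := by
    rw [← hdD]
    have h1 : ((d.toNat : Int)) * (k : Int) = ((d.toNat * k : Nat) : Int) := by push_cast; ring
    rw [h1]
    exact PySem.List.slice_natCast_add sd (d.toNat * k) d.toNat
  rw [hslice]
  have h := pvEnum lim ((sd.drop (d.toNat * k)).take d.toNat) 0 (d * (k : Int))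
  simp only [add_zero] at h
  rw [h]

-- ===== VERDICT (by name: the statement is the Claim_ definition above) =====
theorem overspeed_intervals_spec : Claim_equal_overspeed_intervals := by
  intro sd lim d _ hpre
  unfold Spec_overspeed_intervals
  rcases hpre with hnil | hd
  · subst hnil; rfl
  · by_cases hne : sd = []
    · subst hne; rfl
    · rw [pvPortA_eq, pvA_main lim d hd sd.length sd [] 0 rfl (dvd_zero d), pvB_main sd lim d hd hne]
      simp
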